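-- pv_equiv track=rewrite | github.com/MarcinMariuszMorawski/PythonAlgorithms | StringSearchingAlgorithms/SundayQuickSearch.py | find
-- ===== SOURCE A (Python) =====
-- def find(text, pattern):
--     text_length = len(text)
--     pattern_length = len(pattern)
--     comparison_count = 0
--     shift = [-1] * 256
--     p = 0
--
--     for index in range(pattern_length):
--         ascii_code = ord(pattern[index])
--         shift[ascii_code] = index
--
--     while p <= (text_length - pattern_length):
--         pattern_match = True
--
--         for index in range(pattern_length):
--             comparison_count += 1
--             if pattern[index] != text[p + index]:
--                 pattern_match = False
--
--         if pattern_match: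
--             return p, comparison_count
--
--         p += pattern_length
--
--         if p < text_length:
--             ascii_code = ord(text[p])
--             p = p - shift[ascii_code]
--
--     return -1, comparison_count
-- ===== SOURCE B (Python) =====
-- def find(text, pattern):
--     n = len(text)
--     m = len(pattern)
--     # stage 1: every match position, collected with the library substring search
--     matches = set()
--     i = text.find(pattern)
--     while i != -1:
--         matches.add(i)
--         i = text.find(pattern, i + 1)
--     # stage 2: last occurrence of each pattern character
--     occ = {}
--     for k, c in enumerate(pattern):
--         occ[c] = k
--     # stage 3: replay the jump sequence; each step is O(1), count = steps * m
--     p = 0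
--     steps = 0
--     while p <= n - m:
--         steps += 1
--         if p in matches:
--             return p, steps * m
--         p += m
--         if p < n:
--             p -= occ.get(text[p], -1)
--     return -1, steps * m
-- ===== Notes on version B (the rewrite author's own statement) =====
-- stated objective: faster
-- what changed: B splits the search into staged passes: it first collects the set of ALL match positions with the library substring search (str.find loop), then replays A's jump sequence with an O(1) set-membership test per step and a last-occurrence dict, deriving the count as steps*len(pattern) since A's inner loop never breaks; A instead runs an m-comparison inner loop with a 256-entry shift array at every step.
import Mathlib
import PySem

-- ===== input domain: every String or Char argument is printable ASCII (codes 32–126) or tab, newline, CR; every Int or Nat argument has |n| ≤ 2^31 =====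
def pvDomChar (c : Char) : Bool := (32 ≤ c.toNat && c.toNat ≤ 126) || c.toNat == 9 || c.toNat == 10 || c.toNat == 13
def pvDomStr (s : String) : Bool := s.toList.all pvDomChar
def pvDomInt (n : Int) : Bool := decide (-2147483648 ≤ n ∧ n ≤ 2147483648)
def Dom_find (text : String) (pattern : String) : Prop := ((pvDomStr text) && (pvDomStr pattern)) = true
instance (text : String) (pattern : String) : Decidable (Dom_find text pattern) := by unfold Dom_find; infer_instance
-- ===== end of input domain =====

-- B precomputes the set of ALL match positions with the library substring search and then
-- replays the jump sequence with an O(1) membership test per step and a last-occurrence dict,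
-- deriving the count as steps*len(pattern); same return values as A.

-- ===== PORT A =====
-- one comparison step of A's inner `for index in range(pattern_length)` loop
def stepA (t pat : List Char) (p : Int) (st : Int × Bool) (i : Int) : Int × Bool :=
  (st.1 + 1, if PySem.List.pyGetD pat i ' ' ≠ PySem.List.pyGetD t (p + i) ' ' then false else st.2)

-- A's `shift = [-1]*256` table filled by `for index in range(pattern_length)`
def buildShift (pat : List Char) : List Int :=
  (PySem.List.pyRange 0 (pat.length : Int) 1).foldl
    (fun sh i => PySem.List.pySetD sh ((PySem.List.pyGetD pat i ' ').toNat : Int) i)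
    (List.replicate 256 (-1))

-- A's while loop; fuel is only a totality guard (text.length + 2 always suffices)
def findLoopA (t pat : List Char) (shift : List Int) (fuel : Nat) (p count : Int) : Int × Int :=
  match fuel with
  | 0 => (-1, count)
  | fuel + 1 =>
    if p ≤ (t.length : Int) - (pat.length : Int) then
      let st := (PySem.List.pyRange 0 (pat.length : Int) 1).foldl (stepA t pat p) (count, true)
      if st.2 then (p, st.1)
      else
        let p1 := p + (pat.length : Int)
        let p2 := if p1 < (t.length : Int)
          then p1 - PySem.List.pyGetD shift ((PySem.List.pyGetD t p1 ' ').toNat : Int) (-1)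
          else p1
        findLoopA t pat shift fuel p2 st.1
    else (-1, count)

def find (text : String) (pattern : String) : Int × Int :=
  findLoopA text.toList pattern.toList (buildShift pattern.toList) (text.toList.length + 2) 0 0

-- ===== PORT B =====
-- `i = text.find(pattern); while i != -1: matches.add(i); i = text.find(pattern, i + 1)`
-- fuel is only a totality guard (the start index grows every round; text.length + 2 suffices)
def collectLoop (t pat : List Char) (fuel : Nat) (acc : PySem.Set Int) (i : Int) : PySem.Set Int :=
  match fuel with
  | 0 => acc
  | fuel + 1 =>
    if i ≠ -1 then
      collectLoop t pat fuel (PySem.Set.add acc i) (PySem.Chars.findFrom t pat (i + 1) none)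
    else acc

def buildMatches (t pat : List Char) : PySem.Set Int :=
  collectLoop t pat (t.length + 2) PySem.Set.empty (PySem.Chars.find t pat)

-- `occ = {}; for k, c in enumerate(pattern): occ[c] = k`
def buildLast (pat : List Char) : PySem.Dict Char Int :=
  (PySem.List.enumerate pat 0).foldl (fun d ic => d.insert ic.2 ic.1) PySem.Dict.empty

-- B's replay loop; fuel is only a totality guard (text.length + 2 always suffices)
def findLoopB (t pat : List Char) (last : PySem.Dict Char Int) (ms : PySem.Set Int)
    (fuel : Nat) (p steps : Int) : Int × Int :=
  match fuel with
  | 0 => (-1, steps * (pat.length : Int))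
  | fuel + 1 =>
    if p ≤ (t.length : Int) - (pat.length : Int) then
      let steps1 := steps + 1
      if ms.contains p then
        (p, steps1 * (pat.length : Int))
      else
        let p1 := p + (pat.length : Int)
        let p2 := if p1 < (t.length : Int)
          then p1 - last.getD (PySem.List.pyGetD t p1 ' ') (-1)
          else p1
        findLoopB t pat last ms fuel p2 steps1
    else (-1, steps * (pat.length : Int))

def find_alt (text : String) (pattern : String) : Int × Int :=
  findLoopB text.toList pattern.toList (buildLast pattern.toList)
    (buildMatches text.toList pattern.toList) (text.toList.length + 2) 0 0

-- ===== PRECONDITION & SPEC =====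
def Spec_find (text : String) (pattern : String) (out : Int × Int) : Prop := out = find_alt text pattern
instance (text : String) (pattern : String) (out : Int × Int) : Decidable (Spec_find text pattern out) := by unfold Spec_find; infer_instance

-- ===== CLAIM (what is proved, stated in full; the proofs are below) =====
def Claim_equal_find : Prop := ∀ (text : String) (pattern : String), Dom_find text pattern → Spec_find text pattern (find text pattern)

-- ===== LEMMAS AND PROOFS =====

-- A's inner counting loop: count gains pattern_length, flag = all characters agree
theorem innerA_eq (t pat : List Char) (p : Int) : ∀ (m : Nat) (c : Int) (b : Bool),
    (PySem.List.pyRange 0 (m : Int) 1).foldl (stepA t pat p) (c, b)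
      = (c + m, b && decide (∀ i : Nat, i < m →
          PySem.List.pyGetD pat (i : Int) ' ' = PySem.List.pyGetD t (p + (i : Int)) ' ')) := by
  intro m
  induction m with
  | zero => intro c b; simp [PySem.List.pyRange_one_eq_nil]
  | succ m ih =>
    intro c b
    have hcast : ((m + 1 : Nat) : Int) = (m : Int) + 1 := by omega
    rw [hcast, PySem.List.pyRange_one_succ_right (by positivity), List.foldl_append, ih]
    simp only [List.foldl_cons, List.foldl_nil, stepA]
    rw [Prod.mk.injEq]
    refine ⟨by omega, ?_⟩
    · by_cases h : PySem.List.pyGetD pat (m : Int) ' ' = PySem.List.pyGetD t (p + (m : Int)) ' '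
      · simp only [h, ne_eq, not_true_eq_false, if_false]
        have : (∀ i : Nat, i < m + 1 →
            PySem.List.pyGetD pat (i : Int) ' ' = PySem.List.pyGetD t (p + (i : Int)) ' ')
            ↔ (∀ i : Nat, i < m →
            PySem.List.pyGetD pat (i : Int) ' ' = PySem.List.pyGetD t (p + (i : Int)) ' ') := by
          constructor
          · intro hall i hi; exact hall i (Nat.lt_succ_of_lt hi)
          · intro hall i hi
            rcases Nat.lt_succ_iff_lt_or_eq.mp hi with h' | h'
            · exact hall i h'
            · subst h'; exact h
        rw [decide_eq_decide.mpr this]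
      · simp only [h, ne_eq, not_false_eq_true, if_true]
        have : ¬ (∀ i : Nat, i < m + 1 →
            PySem.List.pyGetD pat (i : Int) ' ' = PySem.List.pyGetD t (p + (i : Int)) ' ') := by
          intro hall; exact h (hall m (Nat.lt_succ_self m))
        rw [decide_eq_false this, Bool.and_false]

-- the slice-equality test equals A's all-characters-agree predicate (in range)
theorem sliceEq_eq (t pat : List Char) (p : Int) (hp : 0 ≤ p)
    (hn : p + (pat.length : Int) ≤ (t.length : Int)) :
    (PySem.List.slice t (some p) (some (p + (pat.length : Int))) == pat)
      = decide (∀ i : Nat, i < pat.length →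
          PySem.List.pyGetD pat (i : Int) ' ' = PySem.List.pyGetD t (p + (i : Int)) ' ') := by
  obtain ⟨a, rfl⟩ : ∃ a : Nat, p = (a : Int) := ⟨p.toNat, (Int.toNat_of_nonneg hp).symm⟩
  have hn' : a + pat.length ≤ t.length := by exact_mod_cast hn
  rw [PySem.List.slice_natCast_add, Bool.eq_iff_iff]
  simp only [beq_iff_eq, decide_eq_true_eq]
  have bridge : ∀ i : Nat, (hi : i < pat.length) →
      (PySem.List.pyGetD pat (i : Int) ' ' = PySem.List.pyGetD t ((a : Int) + (i : Int)) ' '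
        ↔ pat[i]'(by omega) = t[a + i]'(by omega)) := by
    intro i hi
    have h1 : ((a : Int) + (i : Int)) = ((a + i : Nat) : Int) := by omega
    rw [h1, PySem.List.pyGetD_natCast, PySem.List.pyGetD_natCast,
      List.getD_eq_getElem _ _ (by omega), List.getD_eq_getElem _ _ (by omega)]
  constructor
  · intro h i hi
    rw [bridge i hi]
    have h2 := congrArg (fun l => l[i]?) h
    simp only [List.getElem?_take, List.getElem?_drop, hi, if_pos,
      List.getElem?_eq_getElem (show a + i < t.length by omega),
      List.getElem?_eq_getElem hi, Option.some_inj] at h2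
    exact h2.symm
  · intro h
    apply List.ext_getElem
    · simp; omega
    · intro i h1 h2
      rw [List.getElem_take, List.getElem_drop]
      exact ((bridge i h2).mp (h i h2)).symm

-- buildShift as a fold over enumerate
theorem buildShift_enum (pat : List Char) :
    buildShift pat = (PySem.List.enumerate pat 0).foldl
      (fun sh ic => PySem.List.pySetD sh ((ic.2.toNat : Int)) ic.1) (List.replicate 256 (-1)) := by
  rw [PySem.List.enumerate_eq_map_pyRange (d := ' '), List.foldl_map]
  rfl

theorem foldl_pySetD_length (l : List (Int × Char)) : ∀ sh : List Int,
    (l.foldl (fun sh ic => PySem.List.pySetD sh ((ic.2.toNat : Int)) ic.1) sh).length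
      = sh.length := by
  induction l with
  | nil => intro sh; rfl
  | cons x l ih =>
    intro sh
    simp only [List.foldl_cons, ih, PySem.List.length_pySetD]

theorem length_buildShift (pat : List Char) : (buildShift pat).length = 256 := by
  rw [buildShift_enum, foldl_pySetD_length]
  exact List.length_replicate

theorem buildShift_append (pat : List Char) (c0 : Char) :
    buildShift (pat ++ [c0])
      = PySem.List.pySetD (buildShift pat) ((c0.toNat : Int)) ((pat.length : Int)) := by
  rw [buildShift_enum, PySem.List.enumerate_append, List.foldl_append, ← buildShift_enum]
  simp only [PySem.List.enumerate_cons, PySem.List.enumerate_nil, List.foldl_cons,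
    List.foldl_nil, zero_add]

theorem buildLast_append (pat : List Char) (c0 : Char) :
    buildLast (pat ++ [c0]) = (buildLast pat).insert c0 ((pat.length : Int)) := by
  unfold buildLast
  rw [PySem.List.enumerate_append, List.foldl_append]
  simp only [PySem.List.enumerate_cons, PySem.List.enumerate_nil, List.foldl_cons,
    List.foldl_nil, zero_add]

theorem char_cast_inj (c c0 : Char) : c.toNat = c0.toNat ↔ c = c0 := by
  constructor
  · intro h
    apply Char.ext
    apply UInt32.toNat_inj.mp
    exact h
  · intro h; rw [h]

-- the 256-array lookup equals the dict lookup (chars below 256)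
theorem shift_eq_last (pat : List Char) (hpat : ∀ c ∈ pat, c.toNat < 256) (c : Char)
    (hc : c.toNat < 256) :
    PySem.List.pyGetD (buildShift pat) ((c.toNat : Int)) (-1) = (buildLast pat).getD c (-1) := by
  induction pat using List.reverseRecOn with
  | nil =>
    have h1 : buildShift [] = List.replicate 256 (-1) := by
      unfold buildShift
      rw [PySem.List.pyRange_one_eq_nil (by simp)]
      rfl
    have h2 : buildLast [] = PySem.Dict.empty := by
      unfold buildLast
      rw [PySem.List.enumerate_nil]
      rfl
    rw [h1, h2, PySem.Dict.getD_empty, PySem.List.pyGetD_natCast,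
      List.getD_eq_getElem?_getD, List.getElem?_replicate, if_pos hc]
    rfl
  | append_singleton pat c0 ih =>
    have hc0 : c0.toNat < 256 := hpat c0 (by simp)
    have hlen : c0.toNat < (buildShift pat).length := by rw [length_buildShift]; exact hc0
    rw [buildShift_append, buildLast_append,
      PySem.List.pyGetD_pySetD_natCast (buildShift pat) c0.toNat c.toNat _ _ hlen,
      PySem.Dict.getD_insert]
    by_cases h : c = c0
    · simp [h]
    · rw [if_neg (by rw [char_cast_inj]; exact h), if_neg h]
      exact ih (fun d hd => hpat d (by simp [hd]))

-- every stored shift is below pattern length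
theorem last_lt (pat : List Char) (c : Char) :
    (buildLast pat).getD c (-1) < (pat.length : Int) := by
  induction pat using List.reverseRecOn with
  | nil =>
    have h2 : buildLast [] = PySem.Dict.empty := by
      unfold buildLast
      rw [PySem.List.enumerate_nil]
      rfl
    rw [h2, PySem.Dict.getD_empty]
    simp
  | append_singleton pat c0 ih =>
    rw [buildLast_append, PySem.Dict.getD_insert]
    by_cases h : c = c0
    · simp [h]
    · rw [if_neg h]
      refine lt_trans ih ?_
      simp

-- `text.find(pattern, k)` past the end is -1 (CPython's rule, kept by findFrom)
theorem findFrom_past (t pat : List Char) (k : Nat) (h : t.length < k) :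
    PySem.Chars.findFrom t pat (k : Int) none = -1 := by
  simp only [PySem.Chars.findFrom]
  rw [if_pos (by exact_mod_cast h)]

theorem collectLoop_neg_one (t pat : List Char) (fuel : Nat) (acc : PySem.Set Int) :
    collectLoop t pat fuel acc (-1) = acc := by
  cases fuel <;> simp [collectLoop]

-- invariant of the collect loop: starting the library search at k, the final set holds
-- acc plus exactly the match positions j with k ≤ j ≤ |t|
theorem collectLoop_mem (t pat : List Char) : ∀ (fuel k : Nat) (acc : PySem.Set Int) (p : Int),
    k ≤ t.length → t.length + 1 - k ≤ fuel →
    (p ∈ collectLoop t pat fuel acc (PySem.Chars.findFrom t pat (k : Int) none)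
      ↔ p ∈ acc ∨ ∃ j : Nat, k ≤ j ∧ j ≤ t.length ∧ pat <+: t.drop j ∧ p = (j : Int)) := by
  intro fuel
  induction fuel with
  | zero => intro k acc p hk hf; exact absurd hf (by omega)
  | succ fuel ih =>
    intro k acc p hk hf
    rw [PySem.Chars.findFrom_natCast t pat k hk]
    by_cases hnone : PySem.Chars.find (t.drop k) pat = -1
    · rw [if_pos hnone, collectLoop_neg_one]
      have hno : ¬ ∃ j : Nat, k ≤ j ∧ j ≤ t.length ∧ pat <+: t.drop j ∧ p = (j : Int) := by
        rintro ⟨j, hkj, _, hpre, _⟩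
        rw [PySem.Chars.find_eq_neg_one_iff] at hnone
        apply hnone
        rw [← PySem.Chars.isIn_iff_infix, ← PySem.Chars.exists_prefix_drop_iff_isIn]
        refine ⟨j - k, ?_⟩
        rw [List.drop_drop]
        have : k + (j - k) = j := by omega
        rw [this]; exact hpre
      simp [hno]
    · have hr0 : 0 ≤ PySem.Chars.find (t.drop k) pat := by
        have := PySem.Chars.neg_one_le_find (t.drop k) pat
        omega
      obtain ⟨r, hr⟩ : ∃ r : Nat, PySem.Chars.find (t.drop k) pat = (r : Int) :=
        ⟨(PySem.Chars.find (t.drop k) pat).toNat, (Int.toNat_of_nonneg hr0).symm⟩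
      have hspec := PySem.Chars.find_spec (s := t.drop k) (sub := pat) hr0
      rw [hr] at hspec
      simp only [Int.toNat_natCast] at hspec
      have hrlen : r ≤ t.length - k := by
        have := PySem.Chars.find_le_length (t.drop k) pat
        rw [hr] at this
        simp only [List.length_drop] at this
        exact_mod_cast this
      have hj0 : k + r ≤ t.length := by omega
      have hmatch : pat <+: t.drop (k + r) := by
        have := hspec.1
        rwa [List.drop_drop] at this
      have hmin : ∀ j : Nat, k ≤ j → j < k + r → ¬ pat <+: t.drop j := by
        intro j h1 h2 hpre
        have := hspec.2 (j - k) (by omega)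
        rw [List.drop_drop] at this
        have h3 : k + (j - k) = j := by omega
        rw [h3] at this
        exact this hpre
      rw [if_neg hnone, hr]
      have hne : (k : Int) + (r : Int) ≠ -1 := by omega
      rw [collectLoop, if_pos hne]
      have hcast : (k : Int) + (r : Int) + 1 = ((k + r + 1 : Nat) : Int) := by push_cast; ring
      rw [hcast]
      by_cases hend : k + r + 1 ≤ t.length
      · rw [ih (k + r + 1) _ p hend (by omega)]
        constructor
        · rintro (hmem | ⟨j, h1, h2, h3, h4⟩)
          · rw [PySem.Set.mem_add] at hmem
            rcases hmem with hmem | rfl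
            · exact Or.inl hmem
            · exact Or.inr ⟨k + r, by omega, hj0, hmatch, by push_cast; ring⟩
          · exact Or.inr ⟨j, by omega, h2, h3, h4⟩
        · rintro (hmem | ⟨j, h1, h2, h3, h4⟩)
          · exact Or.inl ((PySem.Set.mem_add acc _ p).mpr (Or.inl hmem))
          · by_cases hje : j = k + r
            · subst hje
              refine Or.inl ((PySem.Set.mem_add acc _ p).mpr (Or.inr ?_))
              rw [h4]; push_cast; ring
            · have : k + r + 1 ≤ j := by
                rcases Nat.lt_or_ge j (k + r) with h' | h'
                · exact absurd h3 (hmin j h1 h')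
                · omega
              exact Or.inr ⟨j, this, h2, h3, h4⟩
      · rw [findFrom_past t pat _ (by omega), collectLoop_neg_one]
        have hj0e : k + r = t.length := by omega
        rw [PySem.Set.mem_add]
        constructor
        · rintro (hmem | rfl)
          · exact Or.inl hmem
          · exact Or.inr ⟨k + r, by omega, hj0, hmatch, by push_cast; ring⟩
        · rintro (hmem | ⟨j, h1, h2, h3, h4⟩)
          · exact Or.inl hmem
          · have hje : j = k + r := by
              rcases Nat.lt_or_ge j (k + r) with h' | h'
              · exact absurd h3 (hmin j h1 h')
              · omega
            subst hje
            refine Or.inr ?_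
            rw [h4]; push_cast; ring

-- the precomputed set holds exactly the match positions
theorem mem_buildMatches (t pat : List Char) (p : Int) :
    p ∈ buildMatches t pat
      ↔ ∃ j : Nat, j ≤ t.length ∧ pat <+: t.drop j ∧ p = (j : Int) := by
  unfold buildMatches
  rw [← PySem.Chars.findFrom_zero t pat]
  have h0 : ((0 : Nat) : Int) = (0 : Int) := rfl
  rw [← h0, collectLoop_mem t pat (t.length + 2) 0 PySem.Set.empty p (by omega) (by omega)]
  simp only [PySem.Set.empty, List.not_mem_nil, false_or, Nat.zero_le, true_and]

-- B's membership test equals A's slice comparison on every probed alignment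
theorem matches_contains_eq (t pat : List Char) (p : Int) (hp : 0 ≤ p)
    (hn : p ≤ (t.length : Int) - (pat.length : Int)) :
    (buildMatches t pat).contains p
      = (PySem.List.slice t (some p) (some (p + (pat.length : Int))) == pat) := by
  obtain ⟨a, rfl⟩ : ∃ a : Nat, p = (a : Int) := ⟨p.toNat, (Int.toNat_of_nonneg hp).symm⟩
  have ha : a + pat.length ≤ t.length := by
    have : (a : Int) + (pat.length : Int) ≤ (t.length : Int) := by omega
    exact_mod_cast this
  rw [Bool.eq_iff_iff, PySem.Set.contains_iff, mem_buildMatches,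
    PySem.List.slice_natCast_add, beq_iff_eq]
  constructor
  · rintro ⟨j, hj, hpre, hpj⟩
    have : j = a := by exact_mod_cast hpj.symm
    subst this
    rw [List.prefix_iff_eq_take] at hpre
    exact hpre.symm
  · intro h
    exact ⟨a, by omega, List.prefix_iff_eq_take.mpr h.symm, rfl⟩

theorem loop_eq (t pat : List Char) (hpat : ∀ c ∈ pat, c.toNat < 256)
    (ht : ∀ c ∈ t, c.toNat < 256) : ∀ (fuel : Nat) (p steps : Int), 0 ≤ p →
    findLoopA t pat (buildShift pat) fuel p (steps * (pat.length : Int))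
      = findLoopB t pat (buildLast pat) (buildMatches t pat) fuel p steps := by
  intro fuel
  induction fuel with
  | zero => intro p steps hp; rfl
  | succ fuel ih =>
    intro p steps hp
    rw [findLoopA, findLoopB]
    by_cases hcond : p ≤ (t.length : Int) - (pat.length : Int)
    · rw [if_pos hcond, if_pos hcond]
      simp only [innerA_eq t pat p pat.length, Bool.true_and,
        matches_contains_eq t pat p hp hcond, sliceEq_eq t pat p hp (by omega)]
      by_cases hP : ∀ i : Nat, i < pat.length →
          PySem.List.pyGetD pat (i : Int) ' ' = PySem.List.pyGetD t (p + (i : Int)) ' '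
      · simp only [decide_eq_true hP, if_true]
        have : steps * (pat.length : Int) + (pat.length : Int)
            = (steps + 1) * (pat.length : Int) := by ring
        rw [this]
      · have hm : 0 < pat.length := by
          by_contra hm0
          exact hP (fun i hi => absurd hi (by omega))
        simp only [decide_eq_false hP, if_false, Bool.false_eq_true]
        have hc1 : steps * (pat.length : Int) + (pat.length : Int)
            = (steps + 1) * (pat.length : Int) := by ring
        rw [hc1]
        by_cases hlt : p + (pat.length : Int) < (t.length : Int)
        · rw [if_pos hlt, if_pos hlt]
          have hmem : PySem.List.pyGetD t (p + (pat.length : Int)) ' ' ∈ t := by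
            apply PySem.List.pyGetD_mem
            simp [PySem.Raise.InRange]
            omega
          rw [shift_eq_last pat hpat _ (ht _ hmem)]
          apply ih
          have := last_lt pat (PySem.List.pyGetD t (p + (pat.length : Int)) ' ')
          omega
        · rw [if_neg hlt, if_neg hlt]
          apply ih
          omega
    · rw [if_neg hcond, if_neg hcond]

-- ===== VERDICT (by name: the statement is the Claim_ definition above) =====
theorem find_spec : Claim_equal_find := by
  intro text pattern hdom
  simp only [Dom_find, pvDomStr, Bool.and_eq_true, List.all_eq_true, pvDomChar,
    Bool.or_eq_true, decide_eq_true_eq, beq_iff_eq] at hdom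
  unfold Spec_find find find_alt
  have h := loop_eq text.toList pattern.toList ?_ ?_ (text.toList.length + 2) 0 0 le_rfl
  · simpa using h
  · intro c hc; have := hdom.2 c hc; omega
  · intro c hc; have := hdom.1 c hc; omega
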